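-- pv_equiv track=rewrite | github.com/sivasanjeevs/MAPF-LNS | dynamic_visualizer.py | get_agent_colors
-- ===== SOURCE A (Python) =====
-- def get_agent_colors(n_agents):
--     """Generate distinct colors for agents"""
--     base_colors = [
--         (31, 119, 180), (255, 127, 14), (44, 160, 44), (214, 39, 40),
--         (148, 103, 189), (140, 86, 75), (227, 119, 194), (127, 127, 127),
--         (188, 189, 34), (23, 190, 207), (255, 152, 150), (197, 176, 213)
--     ]
--     colors = []
--     for i in range(n_agents):
--         colors.append(base_colors[i % len(base_colors)])
--     return colors
-- ===== SOURCE B (Python) =====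
-- def get_agent_colors(n_agents):
--     """Generate distinct colors for agents"""
--     base_colors = [
--         (31, 119, 180), (255, 127, 14), (44, 160, 44), (214, 39, 40),
--         (148, 103, 189), (140, 86, 75), (227, 119, 194), (127, 127, 127),
--         (188, 189, 34), (23, 190, 207), (255, 152, 150), (197, 176, 213)
--     ]
--     colors = []
--     remaining = n_agents
--     while remaining > 0:
--         colors.extend(base_colors[:remaining])
--         remaining -= len(base_colors)
--     return colors
-- ===== Notes on version B (the rewrite author's own statement) =====
-- stated objective: alternative
-- what changed: Replaces the per-index loop with modulo indexing by a chunked loop that extends the output with a whole (possibly truncated) copy of the palette per iteration, counting down a remaining counter; no indexing or modulo at all.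
import Mathlib
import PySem

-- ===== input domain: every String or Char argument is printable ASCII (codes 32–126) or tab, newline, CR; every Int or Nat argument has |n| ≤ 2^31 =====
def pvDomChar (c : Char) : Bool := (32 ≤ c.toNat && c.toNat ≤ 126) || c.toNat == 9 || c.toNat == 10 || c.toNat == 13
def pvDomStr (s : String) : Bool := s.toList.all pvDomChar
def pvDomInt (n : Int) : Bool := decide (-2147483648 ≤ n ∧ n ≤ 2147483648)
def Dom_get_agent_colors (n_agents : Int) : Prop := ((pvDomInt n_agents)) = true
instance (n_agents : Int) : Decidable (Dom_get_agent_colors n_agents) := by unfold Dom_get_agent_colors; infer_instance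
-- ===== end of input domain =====

-- B replaces A's per-index loop with modulo indexing by a chunked countdown loop that
-- extends the output with a truncated palette copy per iteration (objective: alternative);
-- same return value for every int argument.

-- ===== PORT A =====
def get_agent_colors (n_agents : Int) : List (Int × Int × Int) :=
  let base_colors : List (Int × Int × Int) :=
    [(31, 119, 180), (255, 127, 14), (44, 160, 44), (214, 39, 40),
     (148, 103, 189), (140, 86, 75), (227, 119, 194), (127, 127, 127),
     (188, 189, 34), (23, 190, 207), (255, 152, 150), (197, 176, 213)]
  (PySem.List.pyRange 0 n_agents 1).foldl
    (fun colors i =>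
      colors ++ [PySem.List.pyGetD base_colors (PySem.Int.mod i (base_colors.length : Int)) (0, 0, 0)])
    []

-- ===== PORT B =====
-- B-side helper: the 'while remaining > 0' loop of Source B, made total with a fuel counter
-- (the fuel only bounds the iteration count; the loop itself stops when remaining ≤ 0).
def pvChunkLoop (base : List (Int × Int × Int)) : Nat → Int → List (Int × Int × Int)
  | 0, _ => []
  | fuel + 1, remaining =>
      if remaining > 0 then
        PySem.List.slice base none (some remaining) ++
          pvChunkLoop base fuel (remaining - (base.length : Int))
      else []

def get_agent_colors_alt (n_agents : Int) : List (Int × Int × Int) :=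
  let base_colors : List (Int × Int × Int) :=
    [(31, 119, 180), (255, 127, 14), (44, 160, 44), (214, 39, 40),
     (148, 103, 189), (140, 86, 75), (227, 119, 194), (127, 127, 127),
     (188, 189, 34), (23, 190, 207), (255, 152, 150), (197, 176, 213)]
  pvChunkLoop base_colors (n_agents.toNat + 1) n_agents

-- ===== PRECONDITION & SPEC =====
def Spec_get_agent_colors (n_agents : Int) (out : List (Int × Int × Int)) : Prop := out = get_agent_colors_alt n_agents
instance (n_agents : Int) (out : List (Int × Int × Int)) : Decidable (Spec_get_agent_colors n_agents out) := by unfold Spec_get_agent_colors; infer_instance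

-- ===== CLAIM (what is proved, stated in full; the proofs are below) =====
def Claim_equal_get_agent_colors : Prop := ∀ (n_agents : Int), Dom_get_agent_colors n_agents → Spec_get_agent_colors n_agents (get_agent_colors n_agents)

-- ===== LEMMAS AND PROOFS =====

-- proof-side abbreviations for the palette and A's per-index element function
def pvB : List (Int × Int × Int) :=
  [(31, 119, 180), (255, 127, 14), (44, 160, 44), (214, 39, 40),
   (148, 103, 189), (140, 86, 75), (227, 119, 194), (127, 127, 127),
   (188, 189, 34), (23, 190, 207), (255, 152, 150), (197, 176, 213)]

def pvF (k : Nat) : Int × Int × Int :=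
  PySem.List.pyGetD pvB (PySem.Int.mod ((0 : Int) + (k : Int)) 12) (0, 0, 0)

theorem pvF_add_twelve (j : Nat) : pvF (12 + j) = pvF j := by
  unfold pvF
  have h : PySem.Int.mod ((0 : Int) + ((12 + j : Nat) : Int)) 12
         = PySem.Int.mod ((0 : Int) + (j : Int)) 12 := by
    simp
  rw [h]

-- the chunked loop computes the modulo-indexed map, given enough fuel
theorem pvChunkLoop_eq (fuel : Nat) : ∀ r : Int, r ≤ (fuel : Int) →
    pvChunkLoop pvB fuel r = (List.range r.toNat).map pvF := by
  induction fuel with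
  | zero =>
    intro r h
    have : r.toNat = 0 := by omega
    simp [pvChunkLoop, this]
  | succ fuel ih =>
    intro r h
    by_cases hr : r > 0
    · obtain ⟨m, rfl⟩ : ∃ m : Nat, r = (m : Int) := ⟨r.toNat, (Int.toNat_of_nonneg (by omega)).symm⟩
      have hmlen : (pvB.length : Int) = 12 := by decide
      have hslice : PySem.List.slice pvB none (some (m : Int)) = pvB.take m := by
        rw [PySem.List.slice_to _ (Int.natCast_nonneg m), Int.toNat_natCast]
      have hsub : ((m : Int) - 12).toNat = m - 12 := by omega
      simp only [pvChunkLoop, if_pos hr, hmlen, hslice,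
        ih _ (by omega : (m : Int) - 12 ≤ (fuel : Int)), hsub, Int.toNat_natCast]
      by_cases h12 : 12 ≤ m
      · have hsplit : m = 12 + (m - 12) := by omega
        rw [List.take_of_length_le (by simp [pvB]; omega)]
        conv_rhs => rw [hsplit, List.range_add, List.map_append, List.map_map]
        have h1 : (List.range 12).map pvF = pvB := by decide
        have h2 : (List.range (m - 12)).map (pvF ∘ (12 + ·)) = (List.range (m - 12)).map pvF := by
          apply List.map_congr_left
          intro j _
          exact pvF_add_twelve j
        rw [h1, h2]
      · have hm0 : m - 12 = 0 := by omega
        have hm : 0 < m := by omega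
        rw [hm0]
        interval_cases m <;> decide
    · have : r.toNat = 0 := by omega
      simp [pvChunkLoop, if_neg hr, this]

-- ===== VERDICT (by name: the statement is the Claim_ definition above) =====
theorem get_agent_colors_spec : Claim_equal_get_agent_colors := by
  intro n _
  unfold Spec_get_agent_colors get_agent_colors get_agent_colors_alt
  rw [PySem.List.foldl_append_singleton_eq_map, List.nil_append,
    PySem.List.pyRange_one, List.map_map]
  rw [show ((pvChunkLoop
      [(31, 119, 180), (255, 127, 14), (44, 160, 44), (214, 39, 40),
       (148, 103, 189), (140, 86, 75), (227, 119, 194), (127, 127, 127),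
       (188, 189, 34), (23, 190, 207), (255, 152, 150), (197, 176, 213)]
      (n.toNat + 1) n) = pvChunkLoop pvB (n.toNat + 1) n) from rfl]
  rw [pvChunkLoop_eq (n.toNat + 1) n (by omega)]
  have hz : (n - 0).toNat = n.toNat := by omega
  rw [hz]
  rfl
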